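-- pv_equiv track=rewrite | github.com/brubsby/oeis_py | sequences/A176942.py | get_champernowne_string_of_length
-- ===== SOURCE A (Python) =====
-- import itertools
--
-- def get_champernowne_string_of_length(k):
--     concat_list = []
--     length = 0
--     for i in itertools.count(start=1):
--         next = str(i)
--         concat_list.append(next)
--         length += len(next)
--         if length >= k:
--             return "".join(concat_list), i + 1
-- ===== SOURCE B (Python) =====
-- def get_champernowne_string_of_length(k):
--     # closed-form digit-count walk: find the first i whose cumulative
--     # Champernowne length reaches k, then build the string in one join
--     if k <= 1:
--         i = 1
--     else:
--         rem = k
--         d = 1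
--         while rem > 9 * 10 ** (d - 1) * d:
--             rem -= 9 * 10 ** (d - 1) * d
--             d += 1
--         i = 10 ** (d - 1) + (rem + d - 1) // d - 1
--     return "".join(str(n) for n in range(1, i + 1)), i + 1
-- ===== Notes on version B (the rewrite author's own statement) =====
-- stated objective: alternative
-- what changed: B computes the stopping integer i directly by a closed-form digit-count walk (subtracting each full digit-block's character contribution from k, then a ceiling division inside the final block) instead of scanning the integers one by one while accumulating string lengths, and then builds the string with a single join; locating i is logarithmic in k instead of linear in i.
import Mathlib
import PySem

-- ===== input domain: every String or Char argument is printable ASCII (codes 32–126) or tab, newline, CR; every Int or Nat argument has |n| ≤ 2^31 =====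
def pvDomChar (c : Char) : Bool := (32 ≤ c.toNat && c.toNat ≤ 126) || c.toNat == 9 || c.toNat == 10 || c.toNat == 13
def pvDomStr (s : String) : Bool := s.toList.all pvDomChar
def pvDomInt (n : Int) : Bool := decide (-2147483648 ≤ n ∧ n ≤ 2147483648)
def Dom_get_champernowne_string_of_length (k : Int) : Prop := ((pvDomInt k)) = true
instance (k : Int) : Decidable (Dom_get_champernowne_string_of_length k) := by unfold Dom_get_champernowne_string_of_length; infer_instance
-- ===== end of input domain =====

-- B replaces A's one-integer-at-a-time scan by a closed-form digit-block walk that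
-- locates the stopping integer directly, then builds the string with a single join.

-- ===== PORT A =====
-- needed by champLoop's termination proof: str(i) is never empty
theorem pv_core_len_lower : ∀ (f n : Nat) (l : List Char), 0 < f →
    l.length < (Nat.toDigitsCore 10 f n l).length := by
  intro f
  induction f with
  | zero => intro n l h; omega
  | succ f ih =>
    intro n l _
    simp only [Nat.toDigitsCore]
    by_cases h0 : n / 10 = 0
    · simp [h0]
    · simp only [h0, if_false]
      cases f with
      | zero => simp [Nat.toDigitsCore]
      | succ f' =>
        have h1 := ih (n / 10) ((n % 10).digitChar :: l) (Nat.succ_pos f')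
        simp only [List.length_cons] at h1
        omega

theorem pv_len_toStr_pos (i : Int) : 1 ≤ PySem.Str.len (PySem.Int.toStr i) := by
  rw [PySem.Str.len_eq, PySem.Int.toList_toStr]
  simp only [PySem.Int.toChars]
  split
  · simp
  · have h := pv_core_len_lower (i.toNat + 1) i.toNat [] (Nat.succ_pos _)
    simp only [List.length_nil] at h
    rw [show Nat.toDigits 10 i.toNat = Nat.toDigitsCore 10 (i.toNat + 1) i.toNat [] from rfl]
    exact_mod_cast h

-- the 'for i in itertools.count(start=1)' loop of A, with its accumulated state
def champLoop (k : Int) (concat_list : List String) (length : Int) (i : Int) : String × Int :=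
  let next := PySem.Int.toStr i
  let concat' := concat_list ++ [next]
  let length' := length + PySem.Str.len next
  if length' ≥ k then (PySem.Str.join "" concat', i + 1)
  else champLoop k concat' length' (i + 1)
termination_by (k - length).toNat
decreasing_by
  have h1 : 1 ≤ PySem.Str.len next := pv_len_toStr_pos i
  have h2 : PySem.Str.len next = PySem.Str.len (PySem.Int.toStr i) := rfl
  simp only [not_le] at *
  omega

def get_champernowne_string_of_length (k : Int) : String × Int :=
  champLoop k [] 0 1

-- ===== PORT B =====
-- the digit-block walk of Source B ('while rem > 9 * 10**(d-1) * d: …');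
-- the '1 ≤ d' guard only makes the recursion total: the call site passes d = 1 and d only grows
def champWalk (rem : Int) (d : Nat) : Int × Nat :=
  if h : 1 ≤ d ∧ 9 * (10:Int) ^ (d - 1) * (d : Int) < rem then
    champWalk (rem - 9 * (10:Int) ^ (d - 1) * (d : Int)) (d + 1)
  else (rem, d)
termination_by rem.toNat
decreasing_by
  obtain ⟨hd, hr⟩ := h
  have _hdi : (0:Int) < (d : Int) := by exact_mod_cast hd
  have hb : (0:Int) < 9 * (10:Int) ^ (d - 1) * (d : Int) := by positivity
  omega

def get_champernowne_string_of_length_alt (k : Int) : String × Int :=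
  let i : Int :=
    if k ≤ 1 then 1
    else
      let p := champWalk k 1
      (10:Int) ^ (p.2 - 1) + PySem.Int.floordiv (p.1 + (p.2 : Int) - 1) (p.2 : Int) - 1
  (PySem.Str.join "" ((PySem.List.pyRange 1 (i + 1) 1).map PySem.Int.toStr), i + 1)

-- ===== PRECONDITION & SPEC =====
def Spec_get_champernowne_string_of_length (k : Int) (out : String × Int) : Prop := out = get_champernowne_string_of_length_alt k
instance (k : Int) (out : String × Int) : Decidable (Spec_get_champernowne_string_of_length k out) := by unfold Spec_get_champernowne_string_of_length; infer_instance

-- ===== CLAIM (what is proved, stated in full; the proofs are below) =====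
def Claim_equal_get_champernowne_string_of_length : Prop := ∀ (k : Int), Dom_get_champernowne_string_of_length k → Spec_get_champernowne_string_of_length k (get_champernowne_string_of_length k)

-- ===== LEMMAS AND PROOFS =====

-- length of str(n) in characters, as an Int
def pvL (n : Int) : Int := ((PySem.Int.toChars n).length : Int)

-- cumulative Champernowne length: pvS i = len(str(1)) + … + len(str(i))
def pvS : Nat → Int
  | 0 => 0
  | i+1 => pvS i + pvL ((i : Int) + 1)

-- characters contributed by all full digit blocks up to width e
def pvC : Nat → Int
  | 0 => 0
  | e+1 => pvC e + 9 * (10:Int) ^ e * ((e : Int) + 1)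

theorem pv_core_len : ∀ (e : Nat) (f n : Nat) (l : List Char),
    10 ^ e ≤ n → n < 10 ^ (e + 1) → n < f →
    (Nat.toDigitsCore 10 f n l).length = (e + 1) + l.length := by
  intro e
  induction e with
  | zero =>
    intro f n l h1 h2 hf
    simp only [pow_zero] at h1
    cases f with
    | zero => omega
    | succ f' =>
      have h0 : n / 10 = 0 := Nat.div_eq_of_lt h2
      simp [Nat.toDigitsCore, h0]
      omega
  | succ e ih =>
    intro f n l h1 h2 hf
    have h10 : (10:Nat) ^ (e + 1) = 10 ^ e * 10 := pow_succ 10 e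
    have h10' : (10:Nat) ^ (e + 2) = 10 ^ (e + 1) * 10 := pow_succ 10 (e + 1)
    have hpe : 1 ≤ (10:Nat) ^ e := Nat.one_le_pow e 10 (by norm_num)
    have hn10 : 10 ≤ n := by nlinarith
    cases f with
    | zero => omega
    | succ f' =>
      have h0 : n / 10 ≠ 0 := by
        intro h; have := Nat.div_eq_of_lt (by omega : n < 10); omega
      simp only [Nat.toDigitsCore, h0, if_false]
      have hlo : 10 ^ e ≤ n / 10 := Nat.le_div_iff_mul_le (by norm_num) |>.mpr (by omega)
      have hhi : n / 10 < 10 ^ (e + 1) := Nat.div_lt_iff_lt_mul (by norm_num) |>.mpr (by omega)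
      have hfu : n / 10 < f' := by
        have := Nat.div_lt_self (by omega : 0 < n) (by norm_num : 1 < 10)
        omega
      rw [ih f' (n / 10) ((n % 10).digitChar :: l) hlo hhi hfu]
      simp
      omega

theorem pv_pvL_eq (e : Nat) (n : Nat) (h1 : 10 ^ e ≤ n) (h2 : n < 10 ^ (e + 1)) :
    pvL (n : Int) = (e : Int) + 1 := by
  have hn : ¬ ((n : Int) < 0) := by omega
  have ht : (n : Int).toNat = n := Int.toNat_natCast n
  simp only [pvL, PySem.Int.toChars, hn, if_false, ht]
  rw [show Nat.toDigits 10 n = Nat.toDigitsCore 10 (n + 1) n [] from rfl]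
  rw [pv_core_len e (n + 1) n [] h1 h2 (Nat.lt_succ_self n)]
  simp

theorem pv_pvL_pos (n : Int) : 1 ≤ pvL n := by
  simp only [pvL, PySem.Int.toChars]
  split
  · simp
  · have := pv_core_len_lower (n.toNat + 1) n.toNat [] (Nat.succ_pos _)
    simp only [List.length_nil] at this
    rw [show Nat.toDigits 10 n.toNat = Nat.toDigitsCore 10 (n.toNat + 1) n.toNat [] from rfl]
    omega

theorem pv_len_toStr (i : Int) : PySem.Str.len (PySem.Int.toStr i) = pvL i := by
  rw [PySem.Str.len_eq, PySem.Int.toList_toStr]; rfl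

theorem pv_pvS_mono {i j : Nat} (h : i ≤ j) : pvS i ≤ pvS j := by
  induction h with
  | refl => exact le_refl _
  | @step m h ih =>
    have := pv_pvL_pos ((m : Int) + 1)
    calc pvS i ≤ pvS m := ih
      _ ≤ pvS m + pvL ((m : Int) + 1) := by linarith
      _ = pvS (m + 1) := rfl

theorem pv_pvS_block (e : Nat) : ∀ (m : Nat), m ≤ 9 * 10 ^ e →
    pvS (10 ^ e - 1 + m) = pvS (10 ^ e - 1) + (m : Int) * ((e : Int) + 1) := by
  intro m
  induction m with
  | zero => simp
  | succ m ih =>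
    intro hm
    have hpe : 1 ≤ (10:Nat) ^ e := Nat.one_le_pow e 10 (by norm_num)
    have h10 : (10:Nat) ^ (e + 1) = 10 ^ e * 10 := pow_succ 10 e
    have hidx : 10 ^ e - 1 + (m + 1) = (10 ^ e - 1 + m) + 1 := rfl
    rw [hidx]
    have hstep : pvS ((10 ^ e - 1 + m) + 1)
        = pvS (10 ^ e - 1 + m) + pvL (((10 ^ e - 1 + m : Nat) : Int) + 1) := rfl
    rw [hstep, ih (by omega)]
    have hcast : ((10 ^ e - 1 + m : Nat) : Int) + 1 = ((10 ^ e + m : Nat) : Int) := by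
      push_cast [Nat.cast_sub hpe]; omega
    rw [hcast, pv_pvL_eq e (10 ^ e + m) (by omega) (by omega)]
    push_cast; ring

theorem pv_pvS_pow (e : Nat) : pvS (10 ^ e - 1) = pvC e := by
  induction e with
  | zero => simp [pvS, pvC]
  | succ e ih =>
    have hpe : 1 ≤ (10:Nat) ^ e := Nat.one_le_pow e 10 (by norm_num)
    have h10 : (10:Nat) ^ (e + 1) = 10 ^ e * 10 := pow_succ 10 e
    have hidx : 10 ^ (e + 1) - 1 = 10 ^ e - 1 + 9 * 10 ^ e := by omega
    rw [hidx, pv_pvS_block e (9 * 10 ^ e) (le_refl _), ih]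
    show pvC e + _ = pvC e + 9 * (10:Int) ^ e * ((e : Int) + 1)
    push_cast; ring

theorem pv_pvS_step (i : Nat) (h1 : 1 ≤ i) :
    pvS (i - 1) + PySem.Str.len (PySem.Int.toStr (i : Int)) = pvS i := by
  rw [pv_len_toStr]
  cases i with
  | zero => omega
  | succ n =>
    simp only [Nat.add_sub_cancel]
    show pvS n + pvL (((n + 1 : Nat)) : Int) = pvS (n + 1)
    push_cast
    rfl

-- A's loop stops as soon as the cumulative length reaches k
theorem pv_loop_stop (k : Int) (i : Nat) (h1 : 1 ≤ i) (hstop : k ≤ pvS i) :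
    champLoop k ((PySem.List.pyRange 1 (i : Int) 1).map PySem.Int.toStr) (pvS (i - 1)) (i : Int)
      = (PySem.Str.join "" ((PySem.List.pyRange 1 ((i : Int) + 1) 1).map PySem.Int.toStr), (i : Int) + 1) := by
  rw [champLoop]

  rw [pv_pvS_step i h1]
  rw [if_pos (by omega : pvS i ≥ k)]
  rw [PySem.List.pyRange_one_succ_right (by exact_mod_cast h1 : (1:Int) ≤ (i : Int)), List.map_append]
  rfl

-- A's loop, characterised: started consistently at index i ≤ t, it stops exactly at t,
-- the least index whose cumulative length reaches k
theorem pv_loop (k : Int) (t : Nat) (ht : 1 ≤ t) (hstop : k ≤ pvS t)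
    (hmin : ∀ j, j < t → pvS j < k) :
    ∀ (fuel i : Nat), t - i ≤ fuel → 1 ≤ i → i ≤ t →
    champLoop k ((PySem.List.pyRange 1 (i : Int) 1).map PySem.Int.toStr) (pvS (i - 1)) (i : Int)
      = (PySem.Str.join "" ((PySem.List.pyRange 1 ((t : Int) + 1) 1).map PySem.Int.toStr), (t : Int) + 1) := by
  intro fuel
  induction fuel with
  | zero =>
    intro i hfi h1i hit
    have : i = t := by omega
    subst this
    exact pv_loop_stop k i h1i hstop
  | succ fuel ih =>
    intro i hfi h1i hit
    by_cases hdone : k ≤ pvS i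
    · have : i = t := by
        by_contra hne
        have hlt : i < t := by omega
        have := hmin i hlt
        omega
      subst this
      exact pv_loop_stop k i h1i hstop
    · have hlt : i < t := by
        by_contra hge
        have : i = t := by omega
        subst this
        omega
      rw [champLoop]

      rw [pv_pvS_step i h1i]
      rw [if_neg (by omega : ¬ pvS i ≥ k)]
      have hih := ih (i + 1) (by omega) (by omega) (by omega)
      push_cast [Nat.add_sub_cancel] at hih
      rw [PySem.List.pyRange_one_succ_right (by exact_mod_cast h1i : (1:Int) ≤ (i : Int)),
        List.map_append] at hih
      simpa using hih

-- B's walk, characterised: from (k, 1) it reaches the digit width e+1 whose block contains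
-- position k, with the remaining offset k - pvC e
theorem pv_walk (k : Int) : ∀ (N : Nat) (rem : Int) (d : Nat), rem.toNat ≤ N → 1 ≤ d →
    rem = k - pvC (d - 1) → 0 < rem →
    ∃ e : Nat, champWalk rem d = (k - pvC e, e + 1) ∧ 0 < k - pvC e ∧
      k - pvC e ≤ 9 * (10:Int) ^ e * ((e : Int) + 1) := by
  intro N
  induction N with
  | zero => intro rem d hN _ _ hpos; omega
  | succ N ih =>
    intro rem d hN hd hrem hpos
    rw [champWalk]
    by_cases hg : 1 ≤ d ∧ 9 * (10:Int) ^ (d - 1) * (d : Int) < rem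
    · rw [dif_pos hg]
      have _hdi : (0:Int) < (d : Int) := by exact_mod_cast hd
      have hb : (0:Int) < 9 * (10:Int) ^ (d - 1) * (d : Int) := by positivity
      have hCd : pvC d = pvC (d - 1) + 9 * (10:Int) ^ (d - 1) * (d : Int) := by
        obtain ⟨e, rfl⟩ : ∃ e, d = e + 1 := ⟨d - 1, by omega⟩
        show pvC (e + 1) = _
        rw [show e + 1 - 1 = e from rfl]
        show pvC e + 9 * (10:Int) ^ e * ((e : Int) + 1) = _
        push_cast; ring
      exact ih (rem - 9 * (10:Int) ^ (d - 1) * (d : Int)) (d + 1)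
        (by omega) (by omega)
        (by rw [show d + 1 - 1 = d from rfl, hCd]; omega)
        (by omega)
    · rw [dif_neg hg]
      refine ⟨d - 1, ?_, by omega, ?_⟩
      · have : (d - 1) + 1 = d := by omega
        rw [this, ← hrem]
      · have hble : rem ≤ 9 * (10:Int) ^ (d - 1) * (d : Int) := by
          by_contra hgt
          exact hg ⟨hd, by omega⟩
        have hcd : ((d - 1 : Nat) : Int) + 1 = (d : Int) := by
          push_cast [Nat.cast_sub hd]; ring
        rw [← hrem, hcd]
        exact hble

-- ===== VERDICT (by name: the statement is the Claim_ definition above) =====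
theorem get_champernowne_string_of_length_spec : Claim_equal_get_champernowne_string_of_length := by
  intro k _
  unfold Spec_get_champernowne_string_of_length
  by_cases hk : k ≤ 1
  · -- k ≤ 1: A stops at i = 1 immediately; B picks i = 1
    rw [get_champernowne_string_of_length, get_champernowne_string_of_length_alt]
    simp only [if_pos hk]
    rw [champLoop]
    have hlen : PySem.Str.len (PySem.Int.toStr 1) = 1 := by decide
    rw [hlen]
    rw [if_pos (by omega : (0:Int) + 1 ≥ k)]
    norm_num
    rw [show PySem.List.pyRange 1 2 1 = [1] from by decide]
    rfl
  · rw [not_le] at hk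
    obtain ⟨e, hwalk, hpos, hle⟩ := pv_walk k k.toNat k 1 (le_refl _) (le_refl _)
      (by simp [pvC]) (by omega)
    have hb0 : (0:Int) < (e : Int) + 1 := by positivity
    have hpow1 : 1 ≤ (10:Nat) ^ e := Nat.one_le_pow e 10 (by norm_num)
    have hcast_b : ((e + 1 : Nat) : Int) = (e : Int) + 1 := by push_cast; ring
    have hcast_pow : ((10 ^ e : Nat) : Int) = (10:Int) ^ e := by push_cast; ring
    set r : Int := k - pvC e with hr
    set q : Int := PySem.Int.floordiv (r + ((e : Int) + 1) - 1) ((e : Int) + 1) with hqdef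
    have hX1 : q * ((e : Int) + 1) ≤ r + ((e : Int) + 1) - 1 :=
      (PySem.Int.le_floordiv_iff_mul_le hb0).mp (le_refl _)
    have hX2 : r + ((e : Int) + 1) - 1 < (q + 1) * ((e : Int) + 1) :=
      (PySem.Int.floordiv_lt_iff_lt_mul hb0).mp (lt_add_one _)
    have hexp1 : (q + 1) * ((e : Int) + 1) = q * ((e : Int) + 1) + ((e : Int) + 1) := by ring
    have hq1 : 1 ≤ q := by nlinarith
    have hq2 : q ≤ 9 * (10:Int) ^ e := by nlinarith
    have hq3 : r ≤ q * ((e : Int) + 1) := by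
      rw [hexp1] at hX2
      exact Int.lt_add_one_iff.mp (by linarith)
    have hq4 : (q - 1) * ((e : Int) + 1) < r := by
      have hexp2 : (q - 1) * ((e : Int) + 1) = q * ((e : Int) + 1) - ((e : Int) + 1) := by ring
      linarith [hX1, hexp2.le, hexp2.ge]
    -- the stopping index t, on the Nat side
    set m : Nat := q.toNat with hm
    have hmq : (m : Int) = q := Int.toNat_of_nonneg (by omega)
    have hm1 : 1 ≤ m := by omega
    have hm2 : m ≤ 9 * 10 ^ e := by
      have : (m : Int) ≤ ((9 * 10 ^ e : Nat) : Int) := by push_cast [hmq]; linarith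
      exact_mod_cast this
    set t : Nat := 10 ^ e - 1 + m with htdef
    have ht : 1 ≤ t := by omega
    have hSt : k ≤ pvS t := by
      rw [htdef, pv_pvS_block e m hm2, pv_pvS_pow e, hmq]
      linarith [hq3]
    have hmin : ∀ j, j < t → pvS j < k := by
      intro j hj
      have hj' : j ≤ t - 1 := by omega
      have hstep : pvS j ≤ pvS (t - 1) := pv_pvS_mono hj'
      have ht1 : t - 1 = 10 ^ e - 1 + (m - 1) := by omega
      have hcm : ((m - 1 : Nat) : Int) = q - 1 := by
        push_cast [Nat.cast_sub hm1, hmq]; ring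
      have : pvS (t - 1) = pvC e + (q - 1) * ((e : Int) + 1) := by
        rw [ht1, pv_pvS_block e (m - 1) (by omega), pv_pvS_pow e, hcm]
      linarith [hq4]
    have hA := pv_loop k t ht hSt hmin t 1 (by omega) (le_refl _) ht
    have h0 : pvS (1 - 1) = 0 := rfl
    rw [Nat.cast_one, PySem.List.pyRange_one_eq_nil (le_refl (1:Int)), h0] at hA
    simp only [List.map_nil] at hA
    -- B's index equals t
    have htq : (t : Int) = (10:Int) ^ e - 1 + q := by
      rw [htdef]
      push_cast [Nat.cast_sub hpow1, hmq, hcast_pow]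
      ring
    rw [get_champernowne_string_of_length, get_champernowne_string_of_length_alt]
    simp only [if_neg (by omega : ¬ k ≤ 1), hwalk, Nat.add_sub_cancel, hcast_b]
    have hieq : (10:Int) ^ (e : Nat) + PySem.Int.floordiv (k - pvC e + ((e : Int) + 1) - 1) ((e : Int) + 1) - 1 = (t : Int) := by
      rw [← hr, ← hqdef, htq]; ring
    rw [hieq]
    exact hA
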